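-- pv_equiv track=rewrite | github.com/nirankusha/DxD_NMT | pipeline/util_maps.py | whitespace_token_spans
-- ===== SOURCE A (Python) =====
-- from typing import List, Tuple
--
-- def whitespace_token_spans(text: str) -> List[Tuple[int, int]]:
--     """
--     Compute (start, end) char spans for whitespace-tokenized words in text.
--     Robust to repeated tokens by scanning incrementally.
--     """
--     spans = []
--     i = 0
--     for w in text.strip().split():
--         # find w starting from i
--         j = text.find(w, i)
--         if j == -1:
--             # fallback: try anywhere after i
--             j = text.find(w, i)
--         k = j + len(w) if j != -1 else i
--         spans.append((j, k))
--         i = k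
--     return spans
-- ===== SOURCE B (Python) =====
-- from typing import List, Tuple
--
-- def whitespace_token_spans(text: str) -> List[Tuple[int, int]]:
--     """Single left-to-right scan: track the start of the current
--     non-whitespace run and close a span whenever whitespace ends it."""
--     spans = []
--     start = None
--     i = 0
--     for ch in text:
--         if ch.isspace():
--             if start is not None:
--                 spans.append((start, i))
--                 start = None
--         else:
--             if start is None:
--                 start = i
--         i += 1
--     if start is not None:
--         spans.append((start, i))
--     return spans
-- ===== Notes on version B (the rewrite author's own statement) =====
-- stated objective: alternative
-- what changed: Replaces strip().split() followed by an incremental text.find() re-location of every token by a single left-to-right character scan that emits a span each time a non-whitespace run ends.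
import Mathlib
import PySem

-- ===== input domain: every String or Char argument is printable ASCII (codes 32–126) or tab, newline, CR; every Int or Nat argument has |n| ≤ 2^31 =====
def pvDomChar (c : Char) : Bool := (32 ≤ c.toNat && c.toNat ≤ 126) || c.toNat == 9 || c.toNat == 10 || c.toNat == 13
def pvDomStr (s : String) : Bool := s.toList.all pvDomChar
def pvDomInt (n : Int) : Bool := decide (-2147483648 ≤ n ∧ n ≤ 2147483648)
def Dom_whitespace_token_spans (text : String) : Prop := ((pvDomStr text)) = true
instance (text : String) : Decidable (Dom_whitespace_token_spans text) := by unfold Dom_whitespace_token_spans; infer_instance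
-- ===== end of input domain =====

-- B replaces strip().split() + incremental find() re-location by one direct character scan; objective: alternative (same cost).

-- ===== PORT A =====
def whitespace_token_spans (text : String) : List (Int × Int) :=
  ((PySem.Str.split₀ (PySem.Str.strip text)).foldl
    (fun (st : List (Int × Int) × Int) w =>
      let j0 := PySem.Str.findFrom text w st.2 none
      let j := if j0 = -1 then PySem.Str.findFrom text w st.2 none else j0
      let k := if j ≠ -1 then j + PySem.Str.len w else st.2
      (st.1 ++ [(j, k)], k))
    ([], 0)).1

-- ===== PORT B =====
-- the for-loop of Source B: index counter, open-run start (None ↔ none), accumulated spans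
def pvSpanGo : List Char → Int → Option Int → List (Int × Int) → List (Int × Int)
  | [], i, st, spans =>
    match st with
    | some s => spans ++ [(s, i)]
    | none => spans
  | c :: cs, i, st, spans =>
    if PySem.Chars.isspace c then
      match st with
      | some s => pvSpanGo cs (i + 1) none (spans ++ [(s, i)])
      | none => pvSpanGo cs (i + 1) none spans
    else
      match st with
      | none => pvSpanGo cs (i + 1) (some i) spans
      | some _ => pvSpanGo cs (i + 1) st spans

def whitespace_token_spans_alt (text : String) : List (Int × Int) :=
  pvSpanGo text.toList 0 none []

-- ===== PRECONDITION & SPEC =====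
def Spec_whitespace_token_spans (text : String) (out : List (Int × Int)) : Prop := out = whitespace_token_spans_alt text
instance (text : String) (out : List (Int × Int)) : Decidable (Spec_whitespace_token_spans text out) := by unfold Spec_whitespace_token_spans; infer_instance

-- ===== CLAIM (what is proved, stated in full; the proofs are below) =====
def Claim_equal_whitespace_token_spans : Prop := ∀ (text : String), Dom_whitespace_token_spans text → Spec_whitespace_token_spans text (whitespace_token_spans text)

-- ===== LEMMAS AND PROOFS =====

def pvNonWS (c : Char) : Bool := !PySem.Chars.isspace c

-- reference spec: spans of maximal non-whitespace runs, starting at index i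
def pvSpans (l : List Char) (i : Int) : List (Int × Int) :=
  match l with
  | [] => []
  | c :: cs =>
    if PySem.Chars.isspace c then pvSpans cs (i + 1)
    else
      (i, i + 1 + ((cs.takeWhile pvNonWS).length : Int)) ::
        pvSpans (cs.dropWhile pvNonWS) (i + 1 + ((cs.takeWhile pvNonWS).length : Int))
termination_by l.length
decreasing_by
  · simp
  · exact Nat.lt_succ_of_le (List.length_dropWhile_le _ _)

lemma pvSpans_nil (i : Int) : pvSpans [] i = [] := by rw [pvSpans]

lemma pvSpans_space {c : Char} (h : PySem.Chars.isspace c = true) (cs : List Char) (i : Int) :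
    pvSpans (c :: cs) i = pvSpans cs (i + 1) := by rw [pvSpans]; simp [h]

lemma pvSpans_word {c : Char} (h : PySem.Chars.isspace c = false) (cs : List Char) (i : Int) :
    pvSpans (c :: cs) i =
      (i, i + 1 + ((cs.takeWhile pvNonWS).length : Int)) ::
        pvSpans (cs.dropWhile pvNonWS) (i + 1 + ((cs.takeWhile pvNonWS).length : Int)) := by
  rw [pvSpans]; simp [h]

-- ---- B side ----

lemma pvSpanGo_spec (cs : List Char) :
    (∀ (i : Int) (spans : List (Int × Int)), pvSpanGo cs i none spans = spans ++ pvSpans cs i) ∧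
    (∀ (i s : Int) (spans : List (Int × Int)), pvSpanGo cs i (some s) spans =
      spans ++ (s, i + ((cs.takeWhile pvNonWS).length : Int)) ::
        pvSpans (cs.dropWhile pvNonWS) (i + ((cs.takeWhile pvNonWS).length : Int))) := by
  induction cs with
  | nil =>
    constructor
    · intro i spans; simp [pvSpanGo, pvSpans_nil]
    · intro i s spans; simp [pvSpanGo, pvSpans_nil]
  | cons c cs ih =>
    obtain ⟨ihn, ihs⟩ := ih
    by_cases h : PySem.Chars.isspace c
    · have hw : pvNonWS c = false := by simp [pvNonWS, h]
      refine ⟨fun i spans => ?_, fun i s spans => ?_⟩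
      · simp [pvSpanGo, h, ihn, pvSpans_space h]
      · rw [show pvSpanGo (c :: cs) i (some s) spans
            = pvSpanGo cs (i + 1) none (spans ++ [(s, i)]) from by simp [pvSpanGo, h]]
        rw [ihn]
        simp [hw, pvSpans_space h]
    · have hb : PySem.Chars.isspace c = false := by simpa using h
      have hw : pvNonWS c = true := by simp [pvNonWS, hb]
      refine ⟨fun i spans => ?_, fun i s spans => ?_⟩
      · rw [show pvSpanGo (c :: cs) i none spans
            = pvSpanGo cs (i + 1) (some i) spans from by simp [pvSpanGo, hb]]
        rw [ihs, pvSpans_word hb]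
      · rw [show pvSpanGo (c :: cs) i (some s) spans
            = pvSpanGo cs (i + 1) (some s) spans from by simp [pvSpanGo, hb]]
        rw [ihs, List.takeWhile_cons, List.dropWhile_cons]
        simp only [hw, if_pos]
        have e : i + 1 + ((cs.takeWhile pvNonWS).length : Int)
            = i + (((c :: cs.takeWhile pvNonWS).length : Nat) : Int) := by
          push_cast [List.length_cons]; ring
        rw [e]

lemma pvAlt_eq (text : String) : whitespace_token_spans_alt text = pvSpans text.toList 0 := by
  unfold whitespace_token_spans_alt
  simpa using (pvSpanGo_spec text.toList).1 0 []

-- ---- split₀ structure ----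

lemma pvGo_cons_eq (c : Char) (rest cur : List Char) (acc : List (List Char)) :
    PySem.Chars.split₀.go (c :: rest) cur acc =
      if PySem.Chars.isspace c then
        (if cur.isEmpty then PySem.Chars.split₀.go rest [] acc
         else PySem.Chars.split₀.go rest [] (cur.reverse :: acc))
      else PySem.Chars.split₀.go rest (c :: cur) acc := rfl

lemma pvGo_nil_eq (cur : List Char) (acc : List (List Char)) :
    PySem.Chars.split₀.go [] cur acc =
      if cur.isEmpty then acc.reverse else (cur.reverse :: acc).reverse := rfl

lemma pvSplit_nil : PySem.Chars.split₀ [] = [] := rfl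

lemma pvSplit_space {c : Char} (h : PySem.Chars.isspace c = true) (cs : List Char) :
    PySem.Chars.split₀ (c :: cs) = PySem.Chars.split₀ cs := by
  unfold PySem.Chars.split₀
  rw [pvGo_cons_eq]
  simp [h]

lemma pvGo_acc (s : List Char) : ∀ (cur : List Char) (acc : List (List Char)),
    PySem.Chars.split₀.go s cur acc = acc.reverse ++ PySem.Chars.split₀.go s cur [] := by
  induction s with
  | nil =>
    intro cur acc
    rw [pvGo_nil_eq, pvGo_nil_eq]
    by_cases h : cur.isEmpty <;> simp [h]
  | cons c rest ih =>
    intro cur acc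
    rw [pvGo_cons_eq, pvGo_cons_eq]
    by_cases h : PySem.Chars.isspace c
    · by_cases hc : cur.isEmpty
      · simp [h, hc, ih [] acc]
      · simp [h, hc, ih [] (cur.reverse :: acc), ih [] [cur.reverse]]
    · simp [h, ih (c :: cur) acc]

lemma pvGo_word (s : List Char) : ∀ (cur : List Char), cur ≠ [] →
    PySem.Chars.split₀.go s cur [] =
      (cur.reverse ++ s.takeWhile pvNonWS) :: PySem.Chars.split₀ (s.dropWhile pvNonWS) := by
  induction s with
  | nil =>
    intro cur hcur
    rw [pvGo_nil_eq]
    simp [List.isEmpty_iff, hcur, pvSplit_nil]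
  | cons c rest ih =>
    intro cur hcur
    rw [pvGo_cons_eq]
    by_cases h : PySem.Chars.isspace c
    · have hw : pvNonWS c = false := by simp [pvNonWS, h]
      rw [if_pos h, if_neg (by simp [List.isEmpty_iff, hcur])]
      rw [pvGo_acc rest [] [cur.reverse]]
      rw [List.takeWhile_cons, List.dropWhile_cons]
      simp only [hw, Bool.false_eq_true, ite_false]
      rw [pvSplit_space h]
      show [cur.reverse].reverse ++ PySem.Chars.split₀.go rest [] []
          = (cur.reverse ++ []) :: PySem.Chars.split₀ rest
      simp [PySem.Chars.split₀]
    · have hw : pvNonWS c = true := by simp [pvNonWS, h]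
      rw [if_neg h]
      rw [ih (c :: cur) (by simp)]
      rw [List.takeWhile_cons, List.dropWhile_cons]
      simp [hw]

lemma pvSplit_word {c : Char} (h : PySem.Chars.isspace c = false) (cs : List Char) :
    PySem.Chars.split₀ (c :: cs) =
      (c :: cs.takeWhile pvNonWS) :: PySem.Chars.split₀ (cs.dropWhile pvNonWS) := by
  have h1 : PySem.Chars.split₀ (c :: cs) = PySem.Chars.split₀.go cs [c] [] := by
    unfold PySem.Chars.split₀
    rw [pvGo_cons_eq]
    simp [h]
  rw [h1, pvGo_word cs [c] (by simp)]
  simp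

lemma pvSplit_all_space : ∀ (t : List Char), (∀ c ∈ t, PySem.Chars.isspace c = true) →
    PySem.Chars.split₀ t = [] := by
  intro t
  induction t with
  | nil => intro _; rfl
  | cons c cs ih =>
    intro h
    rw [pvSplit_space (h c (by simp))]
    exact ih (fun d hd => h d (by simp [hd]))

lemma pvMem_takeWhile {p : Char → Bool} : ∀ {l : List Char} {x : Char}, x ∈ l.takeWhile p → p x = true := by
  intro l
  induction l with
  | nil => intro x hx; simp at hx
  | cons c cs ih =>
    intro x hx
    by_cases h : p c
    · rw [List.takeWhile_cons, if_pos h] at hx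
      rcases List.mem_cons.mp hx with h' | h'
      · subst h'; exact h
      · exact ih h'
    · rw [List.takeWhile_cons, if_neg h] at hx
      simp at hx

lemma pvSplit_append_space (t : List Char) (ht : ∀ c ∈ t, PySem.Chars.isspace c = true) :
    ∀ (n : Nat) (s : List Char), s.length ≤ n →
      PySem.Chars.split₀ (s ++ t) = PySem.Chars.split₀ s := by
  intro n
  induction n with
  | zero =>
    intro s hs
    have hse : s = [] := by
      cases s with
      | nil => rfl
      | cons a b => simp at hs
    subst hse
    simpa [pvSplit_nil] using pvSplit_all_space t ht
  | succ n ih =>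
    intro s hs
    cases s with
    | nil => simpa [pvSplit_nil] using pvSplit_all_space t ht
    | cons c s' =>
      have hs' : s'.length ≤ n := by simpa using Nat.lt_succ_iff.mp (by simpa using hs)
      by_cases h : PySem.Chars.isspace c
      · rw [List.cons_append, pvSplit_space h, pvSplit_space h]
        exact ih s' hs'
      · have hb : PySem.Chars.isspace c = false := by simpa using h
        rw [List.cons_append, pvSplit_word hb, pvSplit_word hb]
        have htwt : t.takeWhile pvNonWS = [] := by
          cases t with
          | nil => rfl
          | cons x xs =>
            have hx : pvNonWS x = false := by simp [pvNonWS, ht x (by simp)]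
            simp [hx]
        have hdwt : t.dropWhile pvNonWS = t := by
          cases t with
          | nil => rfl
          | cons x xs =>
            have hx : pvNonWS x = false := by simp [pvNonWS, ht x (by simp)]
            simp [hx]
        by_cases hall : ∀ x ∈ s', pvNonWS x = true
        · have hts : s'.takeWhile pvNonWS = s' := List.takeWhile_eq_self_iff.mpr hall
          have hlen : (s'.takeWhile pvNonWS).length = s'.length := by rw [hts]
          have hds : s'.dropWhile pvNonWS = [] := List.dropWhile_eq_nil_iff.mpr hall
          rw [List.takeWhile_append, List.dropWhile_append]
          simp [hds, hdwt, htwt, hts, pvSplit_nil, pvSplit_all_space t ht]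
        · have hdne : s'.dropWhile pvNonWS ≠ [] := fun hEq => hall (List.dropWhile_eq_nil_iff.mp hEq)
          have hne : ¬ (s'.takeWhile pvNonWS).length = s'.length := by
            intro hEq
            exact hall (fun x hx => pvMem_takeWhile
              (by rw [(List.takeWhile_prefix pvNonWS).eq_of_length hEq]; exact hx))
          rw [List.takeWhile_append, List.dropWhile_append]
          simp only [List.isEmpty_iff, hdne, if_neg hne, if_false]
          rw [ih (s'.dropWhile pvNonWS) (le_trans (List.length_dropWhile_le _ _) hs')]

lemma pvSplit_lstrip : ∀ (l : List Char),
    PySem.Chars.split₀ (l.dropWhile PySem.Chars.isspace) = PySem.Chars.split₀ l := by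
  intro l
  induction l with
  | nil => rfl
  | cons c cs ih =>
    by_cases h : PySem.Chars.isspace c
    · rw [List.dropWhile_cons, if_pos h, ih, pvSplit_space h]
    · rw [List.dropWhile_cons, if_neg h]

lemma pvSplit_rstrip (l : List Char) :
    PySem.Chars.split₀ (PySem.Chars.rstrip l) = PySem.Chars.split₀ l := by
  have hdecomp : l = PySem.Chars.rstrip l ++ (l.reverse.takeWhile PySem.Chars.isspace).reverse := by
    unfold PySem.Chars.rstrip
    conv_lhs => rw [← List.reverse_reverse l,
      ← List.takeWhile_append_dropWhile (p := PySem.Chars.isspace) (l := l.reverse)]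
    rw [List.reverse_append]
  have ht : ∀ c ∈ (l.reverse.takeWhile PySem.Chars.isspace).reverse, PySem.Chars.isspace c = true := by
    intro c hc
    exact pvMem_takeWhile (List.mem_reverse.mp hc)
  conv_rhs => rw [hdecomp]
  exact (pvSplit_append_space _ ht (PySem.Chars.rstrip l).length _ le_rfl).symm

lemma pvSplit_strip (l : List Char) :
    PySem.Chars.split₀ (PySem.Chars.strip l) = PySem.Chars.split₀ l := by
  unfold PySem.Chars.strip PySem.Chars.lstrip
  rw [pvSplit_rstrip, pvSplit_lstrip]

-- ---- A side ----

def pvStepA (cs : List Char) (st : List (Int × Int) × Int) (w : List Char) : List (Int × Int) × Int :=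
  let j0 := PySem.Chars.findFrom cs w st.2 none
  let j := if j0 = -1 then PySem.Chars.findFrom cs w st.2 none else j0
  let k := if j ≠ -1 then j + (w.length : Int) else st.2
  (st.1 ++ [(j, k)], k)

lemma pvA_eq_chars (text : String) :
    whitespace_token_spans text =
      ((PySem.Chars.split₀ (PySem.Chars.strip text.toList)).foldl (pvStepA text.toList) ([], 0)).1 := by
  unfold whitespace_token_spans pvStepA
  rw [show PySem.Str.split₀ (PySem.Str.strip text)
      = List.map String.ofList (PySem.Chars.split₀ (PySem.Chars.strip text.toList)) by
    simp [PySem.Str.split₀, PySem.Str.toList_strip]]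
  rw [List.foldl_map]
  simp [PySem.Str.len, PySem.Str.findFrom_eq, String.toList_ofList]

lemma pvFindEq (s w : List Char) (n : Nat) (h1 : w <+: s.drop n)
    (h2 : ∀ j, j < n → ¬ w <+: s.drop j) : PySem.Chars.find s w = (n : Int) := by
  have hinf : w <:+: s := List.infix_iff_prefix_suffix.mpr ⟨s.drop n, h1, List.drop_suffix n s⟩
  have h0 : 0 ≤ PySem.Chars.find s w := (PySem.Chars.find_nonneg_iff s w).mpr hinf
  obtain ⟨hp, hmin⟩ := PySem.Chars.find_spec h0
  have hEq : (PySem.Chars.find s w).toNat = n := by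
    rcases Nat.lt_trichotomy (PySem.Chars.find s w).toNat n with h | h | h
    · exact absurd hp (h2 _ h)
    · exact h
    · exact absurd h1 (hmin n h)
  omega

lemma pvFoldA_inv (cs : List Char) : ∀ (n i m : Nat), cs.length - m ≤ n → i ≤ m → m ≤ cs.length →
    (∀ j, i ≤ j → j < m → ∀ (hj : j < cs.length), PySem.Chars.isspace cs[j] = true) →
    ∀ (spans : List (Int × Int)),
      ((PySem.Chars.split₀ (cs.drop m)).foldl (pvStepA cs) (spans, (i : Int))).1
        = spans ++ pvSpans (cs.drop m) (m : Int) := by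
  intro n
  induction n with
  | zero =>
    intro i m hn him hm hsp spans
    have hme : m = cs.length := by omega
    subst hme
    simp [List.drop_length, pvSplit_nil, pvSpans_nil]
  | succ n ih =>
    intro i m hn him hm hsp spans
    rcases hdm : cs.drop m with _ | ⟨c, rest⟩
    · simp [pvSplit_nil, pvSpans_nil]
    · have hmlt : m < cs.length := by
        by_contra hcon
        rw [List.drop_eq_nil_of_le (by omega)] at hdm
        simp at hdm
      have hcons := List.drop_eq_getElem_cons hmlt
      rw [hdm] at hcons
      injection hcons with hc hrest
      by_cases hws : PySem.Chars.isspace c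
      · -- leading whitespace: the word list is unchanged, scan position advances
        rw [pvSplit_space hws, pvSpans_space hws]
        have hsp' : ∀ j, i ≤ j → j < m + 1 → ∀ (hj : j < cs.length), PySem.Chars.isspace cs[j] = true := by
          intro j hij hjm hj
          rcases Nat.lt_or_ge j m with hlt | hge
          · exact hsp j hij hlt hj
          · have hje : j = m := by omega
            subst hje
            rw [← hc]
            exact hws
        have hrec := ih i (m + 1) (by omega) (by omega) (by omega) hsp' spans
        rw [← hrest] at hrec
        have e : ((m + 1 : Nat) : Int) = (m : Int) + 1 := by push_cast; ring
        rw [e] at hrec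
        exact hrec
      · have hb : PySem.Chars.isspace c = false := by simpa using hws
        rw [pvSplit_word hb, pvSpans_word hb, List.foldl_cons]
        set t := (rest.takeWhile pvNonWS).length with ht
        set w := c :: rest.takeWhile pvNonWS with hwdef
        -- the incremental find lands exactly at the word's true position m
        have hfind : PySem.Chars.find (cs.drop i) w = ((m - i : Nat) : Int) := by
          apply pvFindEq
          · rw [List.drop_drop, show i + (m - i) = m by omega, hdm]
            exact List.cons_prefix_cons.mpr ⟨rfl, List.takeWhile_prefix _⟩
          · intro j hj hpre
            have hij : i + j < m := by omega
            have hijlen : i + j < cs.length := by omega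
            rw [List.drop_drop, List.drop_eq_getElem_cons hijlen] at hpre
            have hch : c = cs[i + j] := (List.cons_prefix_cons.mp hpre).1
            have hsps := hsp (i + j) (by omega) hij hijlen
            rw [← hch] at hsps
            rw [hsps] at hb
            exact Bool.noConfusion hb
        have hff : PySem.Chars.findFrom cs w (i : Int) none = (m : Int) := by
          rw [PySem.Chars.findFrom_natCast cs w i (by omega), hfind]
          rw [if_neg (by omega : ¬ ((m - i : Nat) : Int) = -1)]
          omega
        have hkey : (m : Int) + (w.length : Int) = ((m + 1 + t : Nat) : Int) := by
          rw [hwdef]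
          push_cast [List.length_cons]
          ring
        have hstep : pvStepA cs (spans, (i : Int)) w
            = (spans ++ [((m : Int), ((m + 1 + t : Nat) : Int))], ((m + 1 + t : Nat) : Int)) := by
          simp only [pvStepA, hff]
          rw [if_neg (by omega : ¬ (m : Int) = -1)]
          rw [if_pos (by omega : (m : Int) ≠ -1)]
          rw [hkey]
        rw [hstep]
        have htle : t ≤ cs.length - (m + 1) := by
          have h1 : (rest.takeWhile pvNonWS).length ≤ rest.length := (List.takeWhile_prefix _).length_le
          have h2 : rest.length = cs.length - (m + 1) := by rw [hrest, List.length_drop]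
          omega
        have hdrop : cs.drop (m + 1 + t) = rest.dropWhile pvNonWS := by
          rw [← List.drop_drop, ← hrest]
          conv_lhs => rw [show rest = rest.takeWhile pvNonWS ++ rest.dropWhile pvNonWS from
            (List.takeWhile_append_dropWhile).symm]
          rw [ht, List.drop_left]
        have hrec := ih (m + 1 + t) (m + 1 + t) (by omega) le_rfl (by omega)
          (by intro j h1 h2; omega) (spans ++ [((m : Int), ((m + 1 + t : Nat) : Int))])
        rw [hdrop] at hrec
        rw [hrec]
        have e : ((m + 1 + t : Nat) : Int) = (m : Int) + 1 + (t : Int) := by push_cast; ring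
        rw [e]
        simp [List.append_assoc]

-- ===== VERDICT (by name: the statement is the Claim_ definition above) =====
theorem whitespace_token_spans_spec : Claim_equal_whitespace_token_spans := by
  intro text _
  show whitespace_token_spans text = whitespace_token_spans_alt text
  rw [pvA_eq_chars, pvAlt_eq, pvSplit_strip]
  have := pvFoldA_inv text.toList text.toList.length 0 0 (by omega) le_rfl (Nat.zero_le _)
    (by intro j h1 h2; omega) []
  simpa using this
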